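-- pv_equiv track=rewrite | github.com/Xinglab/rMATS-long | scripts/plot_splice_graph.py | get_asm_node_ids
-- ===== SOURCE A (Python) =====
-- def get_asm_node_ids(isoforms, strand):
--     nodes = set()
--     for isoform in isoforms:
--         if strand == '-':
--             isoform = reversed(isoform)
--
--         is_start = True
--         for coord in isoform:
--             if is_start:
--                 node = 's{}'.format(coord)
--                 is_start = False
--             else:
--                 node = 'e{}'.format(coord)
--                 is_start = True
--
--             # The start or end node ID
--             nodes.add(node)
--             # The coordinate ID
--             nodes.add(str(coord))
--
--     return nodes
-- ===== SOURCE B (Python) =====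
-- def get_asm_node_ids(isoforms, strand):
--     nodes = set()
--     for isoform in isoforms:
--         seq = list(reversed(isoform)) if strand == '-' else list(isoform)
--         # Pair the coordinates into (start, end) exon pairs; a trailing
--         # unpaired coordinate is a lone start.
--         for start, end in zip(seq[::2], seq[1::2]):
--             nodes.update(('s' + str(start), str(start),
--                           'e' + str(end), str(end)))
--         if len(seq) % 2:
--             last = seq[-1]
--             nodes.update(('s' + str(last), str(last)))
--     return nodes
-- ===== Notes on version B (the rewrite author's own statement) =====
-- stated objective: alternative
-- what changed: Instead of a per-element is_start toggle flag, B chunks each (possibly reversed) isoform into (start, end) exon pairs by zipping the two strided slices seq[::2]/seq[1::2], emits all four labels of a pair at once, and handles a trailing unpaired coordinate separately.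
import Mathlib
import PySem

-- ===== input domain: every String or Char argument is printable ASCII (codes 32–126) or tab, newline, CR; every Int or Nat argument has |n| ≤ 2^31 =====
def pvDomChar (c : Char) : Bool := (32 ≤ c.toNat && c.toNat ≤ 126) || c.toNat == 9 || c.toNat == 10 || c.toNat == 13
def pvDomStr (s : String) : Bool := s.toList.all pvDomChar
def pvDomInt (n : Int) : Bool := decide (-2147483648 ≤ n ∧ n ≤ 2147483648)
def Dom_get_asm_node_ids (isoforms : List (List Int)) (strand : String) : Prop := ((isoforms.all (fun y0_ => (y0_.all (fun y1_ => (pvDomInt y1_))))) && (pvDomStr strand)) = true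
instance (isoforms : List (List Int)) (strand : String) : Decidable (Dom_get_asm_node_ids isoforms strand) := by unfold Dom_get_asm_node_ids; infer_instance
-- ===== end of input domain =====

-- B replaces A's per-element is_start toggle flag by chunking each (possibly reversed)
-- isoform into (start, end) exon pairs via zipped strided slices, with a trailing
-- unpaired coordinate handled separately; return values only (no mutation).

-- ===== PORT A =====
def get_asm_node_ids (isoforms : List (List Int)) (strand : String) : List String :=
  isoforms.foldl (fun nodes isoform0 =>
    let isoform := if strand == "-" then isoform0.reverse else isoform0
    (isoform.foldl (fun (st : PySem.Set String × Bool) coord =>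
        let node := if st.2 then "s" ++ PySem.Int.toStr coord else "e" ++ PySem.Int.toStr coord
        (PySem.Set.add (PySem.Set.add st.1 node) (PySem.Int.toStr coord), !st.2))
      (nodes, true)).1)
    PySem.Set.empty

-- ===== PORT B =====
-- seq[::2] for a step-2 nonnegative slice: every element at an even index (exact here)
def pvEveryOther : List Int → List Int
  | [] => []
  | [a] => [a]
  | a :: _ :: rest => a :: pvEveryOther rest

-- the odd-length tail of Source B: 'if len(seq) % 2: last = seq[-1]; nodes.update(...)';
-- seq[-1] on the (nonempty, since odd length) list is its last element (exact here)
def pvOddTail (nodes : PySem.Set String) (seq : List Int) : PySem.Set String :=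
  if seq.length % 2 == 1 then
    match seq.getLast? with
    | some last => PySem.Set.add (PySem.Set.add nodes ("s" ++ PySem.Int.toStr last)) (PySem.Int.toStr last)
    | none => nodes
  else nodes

def get_asm_node_ids_alt (isoforms : List (List Int)) (strand : String) : List String :=
  isoforms.foldl (fun nodes isoform =>
    let seq := if strand == "-" then isoform.reverse else isoform
    -- seq[1::2] = every other element of seq.drop 1
    let pairs := (pvEveryOther seq).zip (pvEveryOther (seq.drop 1))
    let nodes := pairs.foldl (fun n (p : Int × Int) =>
      PySem.Set.add (PySem.Set.add (PySem.Set.add (PySem.Set.add n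
        ("s" ++ PySem.Int.toStr p.1)) (PySem.Int.toStr p.1))
        ("e" ++ PySem.Int.toStr p.2)) (PySem.Int.toStr p.2)) nodes
    pvOddTail nodes seq)
    PySem.Set.empty

-- ===== PRECONDITION & SPEC =====
def Spec_get_asm_node_ids (isoforms : List (List Int)) (strand : String) (out : List String) : Prop := out = get_asm_node_ids_alt isoforms strand
instance (isoforms : List (List Int)) (strand : String) (out : List String) : Decidable (Spec_get_asm_node_ids isoforms strand out) := by unfold Spec_get_asm_node_ids; infer_instance

-- ===== CLAIM (what is proved, stated in full; the proofs are below) =====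
def Claim_equal_get_asm_node_ids : Prop := ∀ (isoforms : List (List Int)) (strand : String), Dom_get_asm_node_ids isoforms strand → Spec_get_asm_node_ids isoforms strand (get_asm_node_ids isoforms strand)

-- ===== LEMMAS AND PROOFS =====

-- the exon-pair list of a::b::rest is (a,b) followed by the exon pairs of rest
theorem pv_pairs_cons (a b : Int) (rest : List Int) :
    (pvEveryOther (a :: b :: rest)).zip (pvEveryOther ((a :: b :: rest).drop 1))
    = (a, b) :: (pvEveryOther rest).zip (pvEveryOther (rest.drop 1)) := by
  cases rest with
  | nil => rfl
  | cons c r => rfl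

-- the odd tail of a::b::rest is the odd tail of rest
theorem pv_oddTail_cons_cons (n : PySem.Set String) (a b : Int) (rest : List Int) :
    pvOddTail n (a :: b :: rest) = pvOddTail n rest := by
  cases rest with
  | nil => simp [pvOddTail]
  | cons c r =>
    simp only [pvOddTail, List.length_cons, List.getLast?_cons_cons]
    have h : (r.length + 1 + 1 + 1) % 2 = (r.length + 1) % 2 := by omega
    rw [h]
    rfl

-- A's toggle-flag inner loop equals B's exon-pair fold plus the odd tail
theorem pv_inner (seq : List Int) : ∀ (nodes : PySem.Set String),
    (seq.foldl (fun (st : PySem.Set String × Bool) coord =>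
        let node := if st.2 then "s" ++ PySem.Int.toStr coord else "e" ++ PySem.Int.toStr coord
        (PySem.Set.add (PySem.Set.add st.1 node) (PySem.Int.toStr coord), !st.2))
      (nodes, true)).1
    = pvOddTail
        (((pvEveryOther seq).zip (pvEveryOther (seq.drop 1))).foldl (fun n (p : Int × Int) =>
          PySem.Set.add (PySem.Set.add (PySem.Set.add (PySem.Set.add n
            ("s" ++ PySem.Int.toStr p.1)) (PySem.Int.toStr p.1))
            ("e" ++ PySem.Int.toStr p.2)) (PySem.Int.toStr p.2)) nodes)
        seq := by
  induction seq using pvEveryOther.induct with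
  | case1 => intro nodes; rfl
  | case2 a => intro nodes; rfl
  | case3 a b rest ih =>
    intro nodes
    rw [pv_pairs_cons, pv_oddTail_cons_cons]
    simp only [List.foldl_cons]
    rw [← ih]
    rfl

-- the outer folds agree from any common accumulator
theorem pv_outer (isoforms : List (List Int)) (strand : String) :
    ∀ (acc : PySem.Set String),
    isoforms.foldl (fun nodes isoform0 =>
      let isoform := if strand == "-" then isoform0.reverse else isoform0
      (isoform.foldl (fun (st : PySem.Set String × Bool) coord =>
          let node := if st.2 then "s" ++ PySem.Int.toStr coord else "e" ++ PySem.Int.toStr coord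
          (PySem.Set.add (PySem.Set.add st.1 node) (PySem.Int.toStr coord), !st.2))
        (nodes, true)).1) acc
    = isoforms.foldl (fun nodes isoform =>
      let seq := if strand == "-" then isoform.reverse else isoform
      let pairs := (pvEveryOther seq).zip (pvEveryOther (seq.drop 1))
      let nodes := pairs.foldl (fun n (p : Int × Int) =>
        PySem.Set.add (PySem.Set.add (PySem.Set.add (PySem.Set.add n
          ("s" ++ PySem.Int.toStr p.1)) (PySem.Int.toStr p.1))
          ("e" ++ PySem.Int.toStr p.2)) (PySem.Int.toStr p.2)) nodes
      pvOddTail nodes seq) acc := by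
  induction isoforms with
  | nil => intro acc; rfl
  | cons iso rest ih =>
    intro acc
    simp only [List.foldl_cons]
    rw [ih, pv_inner]

-- ===== VERDICT (by name: the statement is the Claim_ definition above) =====
theorem get_asm_node_ids_spec : Claim_equal_get_asm_node_ids := by
  intro isoforms strand _
  unfold Spec_get_asm_node_ids get_asm_node_ids get_asm_node_ids_alt
  exact pv_outer isoforms strand PySem.Set.empty
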